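-- pv_equiv track=rewrite | github.com/vishalpmittal/practice-fun | funNLearn/src/main/java/dsAlgo/dp/CutFilmsIntoScenes.py | lengthEachScene
-- ===== SOURCE A (Python) =====
-- def lengthEachScene(inputList):
--     max_shot_indx = {}
--
--     for i, shot in enumerate(inputList):
--         max_shot_indx[shot] = max(max_shot_indx.get(shot, i), i)
--
--     res_count = []
--     i = 0
--
--     while i < len(inputList):
--         curr_end = max_shot_indx[inputList[i]]
--         curr_count = 1
--         i += 1
--
--         while i <= curr_end:
--             curr_count += 1
--             curr_end = max(max_shot_indx[inputList[i]], curr_end)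
--             i += 1
--
--         res_count.append(curr_count)
--
--     return res_count
-- ===== SOURCE B (Python) =====
-- def lengthEachScene(inputList):
--     # Interval-merge reformulation: map each distinct element to its
--     # [first, last] occurrence interval, then merge overlapping intervals
--     # (in first-occurrence order) into maximal segments.
--     intervals = {}
--     for i, shot in enumerate(inputList):
--         if shot in intervals:
--             intervals[shot] = (intervals[shot][0], i)
--         else:
--             intervals[shot] = (i, i)
--     vals = list(intervals.values())
--     if not vals:
--         return []
--     (s, e) = vals[0]
--     res = []
--     for (f, g) in vals[1:]:
--         if f <= e:
--             e = max(e, g)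
--         else:
--             res.append(e - s + 1)
--             s, e = f, g
--     res.append(e - s + 1)
--     return res
-- ===== Notes on version B (the rewrite author's own statement) =====
-- stated objective: alternative
-- what changed: A greedily scans positions with nested while-loops extending a running segment end from a last-index dict; B instead builds a dict mapping each distinct element to its [first,last] occurrence interval and merges these intervals (in first-occurrence order) into maximal segments, emitting each merged length.
import Mathlib
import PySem

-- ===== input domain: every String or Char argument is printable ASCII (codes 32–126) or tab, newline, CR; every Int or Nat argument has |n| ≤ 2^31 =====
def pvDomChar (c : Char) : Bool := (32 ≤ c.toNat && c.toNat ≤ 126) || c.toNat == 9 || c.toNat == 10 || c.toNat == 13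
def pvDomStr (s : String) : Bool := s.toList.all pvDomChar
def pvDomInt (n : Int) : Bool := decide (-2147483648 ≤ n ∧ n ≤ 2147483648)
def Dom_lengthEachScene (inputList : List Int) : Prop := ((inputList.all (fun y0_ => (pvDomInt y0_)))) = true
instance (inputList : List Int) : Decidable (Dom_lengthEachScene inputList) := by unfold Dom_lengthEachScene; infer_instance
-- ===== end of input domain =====

-- B replaces A's greedy nested-while position scan by building a first/last-occurrence
-- interval per distinct element and merging overlapping intervals (objective: alternative).

-- ===== PORT A =====
-- max_shot_indx[shot] = max(max_shot_indx.get(shot, i), i)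
def buildLast (l : List Int) : PySem.Dict Int Int :=
  (PySem.List.enumerate l 0).foldl
    (fun d p => d.insert p.2 (max (d.getD p.2 p.1) p.1)) PySem.Dict.empty

-- inner 'while i <= curr_end' loop; fuel only makes the recursion total (l.length + 1
-- always suffices since curr_end < l.length); i is the Python loop index (always ≥ 0),
-- l.getD i 0 = inputList[i] (i < len holds on every reached lookup) and
-- d.getD … 0 = max_shot_indx[inputList[i]] (the key is always present).
def innerA (d : PySem.Dict Int Int) (l : List Int) : Nat → Nat → Int → Int → Int × Nat
  | 0, i, _, c => (c, i)
  | fuel + 1, i, e, c =>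
    if (i : Int) ≤ e then
      innerA d l fuel (i + 1) (max (d.getD (l.getD i 0) 0) e) (c + 1)
    else (c, i)

-- outer 'while i < len(inputList)' loop (same fuel remark)
def outerA (d : PySem.Dict Int Int) (l : List Int) : Nat → Nat → List Int
  | 0, _ => []
  | fuel + 1, i =>
    if i < l.length then
      let e := d.getD (l.getD i 0) 0
      let r := innerA d l (l.length + 1) (i + 1) e 1
      r.1 :: outerA d l fuel r.2
    else []

def lengthEachScene (inputList : List Int) : List Int :=
  outerA (buildLast inputList) inputList (inputList.length + 1) 0

-- ===== PORT B =====
-- intervals[shot] = (intervals[shot][0], i) / (i, i); the getD default (0,0) is never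
-- used: the branch is guarded by contains.
def buildIv (l : List Int) : PySem.Dict Int (Int × Int) :=
  (PySem.List.enumerate l 0).foldl
    (fun d p =>
      if d.contains p.2 then d.insert p.2 ((d.getD p.2 (0, 0)).1, p.1)
      else d.insert p.2 (p.1, p.1)) PySem.Dict.empty

-- 'for (f, g) in vals[1:]' merge loop with trailing append
def mergeB : Int → Int → List (Int × Int) → List Int
  | s, e, [] => [e - s + 1]
  | s, e, (f, g) :: t =>
    if f ≤ e then mergeB s (max e g) t
    else (e - s + 1) :: mergeB f g t

def lengthEachScene_alt (inputList : List Int) : List Int :=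
  match (buildIv inputList).values with
  | [] => []
  | (s, e) :: t => mergeB s e t

-- ===== PRECONDITION & SPEC =====
def Spec_lengthEachScene (inputList : List Int) (out : List Int) : Prop := out = lengthEachScene_alt inputList
instance (inputList : List Int) (out : List Int) : Decidable (Spec_lengthEachScene inputList out) := by unfold Spec_lengthEachScene; infer_instance

-- ===== CLAIM (what is proved, stated in full; the proofs are below) =====
def Claim_equal_lengthEachScene : Prop := ∀ (inputList : List Int), Dom_lengthEachScene inputList → Spec_lengthEachScene inputList (lengthEachScene inputList)

-- ===== LEMMAS AND PROOFS =====

-- last index of x in l (-1 if absent), as a fold over enumerate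
def lastP (l : List Int) (x : Int) : Int :=
  (PySem.List.enumerate l 0).foldl (fun a p => if p.2 = x then p.1 else a) (-1)

-- first index of x in l (-1 if absent)
def firstP (l : List Int) (x : Int) : Int :=
  (PySem.List.enumerate l 0).foldl (fun a p => if a = -1 ∧ p.2 = x then p.1 else a) (-1)

-- last index of the element sitting at position j
def G (l : List Int) (j : Nat) : Int := lastP l (l.getD j 0)

-- B's interval list: per distinct element (first-occurrence order) its (first, last) indices
def firstsList (l : List Int) : List (Int × Int) :=
  (PySem.List.dedup l).map (fun x => (firstP l x, lastP l x))

-- invariants of the remaining-interval list L at scan position i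
def Hmem (l : List Int) (i : Nat) (L : List (Int × Int)) : Prop :=
  ∀ p ∈ L, ∃ j : Nat, p.1 = (j : Int) ∧ i ≤ j ∧ j < l.length ∧
    firstP l (l.getD j 0) = (j : Int) ∧ p.2 = G l j

def Hcomp (l : List Int) (i : Nat) (L : List (Int × Int)) : Prop :=
  ∀ j : Nat, i ≤ j → j < l.length → firstP l (l.getD j 0) = (j : Int) → ((j : Int), G l j) ∈ L

lemma enum_concat (l : List Int) (y : Int) :
    PySem.List.enumerate (l ++ [y]) 0 = PySem.List.enumerate l 0 ++ [((l.length : Int), y)] := by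
  rw [PySem.List.enumerate_append]
  simp [PySem.List.enumerate_cons, PySem.List.enumerate_nil]

lemma lastP_concat (l : List Int) (y x : Int) :
    lastP (l ++ [y]) x = if y = x then (l.length : Int) else lastP l x := by
  simp [lastP, enum_concat, List.foldl_append]

lemma firstP_concat (l : List Int) (y x : Int) :
    firstP (l ++ [y]) x = if firstP l x = -1 ∧ y = x then (l.length : Int) else firstP l x := by
  simp [firstP, enum_concat, List.foldl_append]

lemma lastP_lt (l : List Int) (x : Int) : lastP l x < (l.length : Int) := by
  induction l using List.reverseRecOn with
  | nil => simp [lastP, PySem.List.enumerate_nil]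
  | append_singleton l y ih =>
      rw [lastP_concat]; simp only [List.length_append, List.length_cons, List.length_nil]
      split <;> push_cast <;> omega

lemma firstP_lt (l : List Int) (x : Int) : firstP l x < (l.length : Int) := by
  induction l using List.reverseRecOn with
  | nil => simp [firstP, PySem.List.enumerate_nil]
  | append_singleton l y ih =>
      rw [firstP_concat]; simp only [List.length_append, List.length_cons, List.length_nil]
      split <;> push_cast <;> omega

lemma firstP_neg_iff (l : List Int) (x : Int) : firstP l x = -1 ↔ x ∉ l := by
  induction l using List.reverseRecOn with
  | nil => simp [firstP, PySem.List.enumerate_nil]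
  | append_singleton l y ih =>
      rw [firstP_concat]
      by_cases h2 : y = x
      · subst h2
        by_cases h1 : firstP l y = -1
        · rw [if_pos ⟨h1, rfl⟩]
          have hmem : y ∈ l ++ [y] := by simp
          simp only [hmem, not_true_eq_false, iff_false]
          omega
        · rw [if_neg (fun hc => h1 hc.1)]
          have hmem : y ∈ l := not_not.mp (fun hn => h1 (ih.mpr hn))
          simp [h1, List.mem_append, hmem]
      · have hxy : x ≠ y := fun hxy => h2 hxy.symm
        simp [h2, ih, List.mem_append, hxy]

lemma lastP_getD_ge (l : List Int) : ∀ j : Nat, j < l.length → (j : Int) ≤ lastP l (l.getD j 0) := by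
  induction l using List.reverseRecOn with
  | nil => simp
  | append_singleton l y ih =>
      intro j hj
      simp only [List.length_append, List.length_cons, List.length_nil] at hj
      rcases Nat.lt_or_ge j l.length with h | h
      · rw [List.getD_append _ _ _ _ h, lastP_concat]
        split
        · omega
        · exact ih j h
      · have hj' : j = l.length := by omega
        subst hj'
        rw [List.getD_append_right _ _ _ _ h, Nat.sub_self]
        simp only [List.getD]
        rw [lastP_concat]
        simp

lemma firstP_spec (l : List Int) (x : Int) (h : x ∈ l) :
    0 ≤ firstP l x ∧ firstP l x < (l.length : Int) ∧ l.getD (firstP l x).toNat 0 = x := by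
  induction l using List.reverseRecOn with
  | nil => simp at h
  | append_singleton l y ih =>
      rw [firstP_concat]
      by_cases hmem : x ∈ l
      · have h1 : firstP l x ≠ -1 := fun hc => (firstP_neg_iff l x).mp hc hmem
        rw [if_neg (fun hc => h1 hc.1)]
        obtain ⟨a, b, c⟩ := ih hmem
        refine ⟨a, by rw [List.length_append]; omega, ?_⟩
        rw [List.getD_append _ _ _ _ (by omega : (firstP l x).toNat < l.length)]
        exact c
      · have h1 : firstP l x = -1 := (firstP_neg_iff l x).mpr hmem
        have hxy : y = x := by
          rcases List.mem_append.mp h with h' | h'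
          · exact absurd h' hmem
          · exact (List.mem_singleton.mp h').symm
        rw [if_pos ⟨h1, hxy⟩]
        refine ⟨by omega, by rw [List.length_append]; simp, ?_⟩
        rw [Int.toNat_natCast, List.getD_append_right _ _ _ _ (le_refl _), Nat.sub_self]
        simpa using hxy

lemma firstP_getD_le (l : List Int) : ∀ j : Nat, j < l.length → firstP l (l.getD j 0) ≤ (j : Int) := by
  induction l using List.reverseRecOn with
  | nil => intro j hj; simp at hj
  | append_singleton l y ih =>
      intro j hj
      simp only [List.length_append, List.length_cons, List.length_nil] at hj
      rcases Nat.lt_or_ge j l.length with h | h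
      · rw [List.getD_append _ _ _ _ h, firstP_concat]
        have hmem : l.getD j 0 ∈ l := by
          rw [List.getD_eq_getElem l 0 h]; exact List.getElem_mem h
        rw [if_neg (fun hc => (firstP_neg_iff l _).mp hc.1 hmem)]
        exact ih j h
      · have hj' : j = l.length := by omega
        subst hj'
        rw [List.getD_append_right _ _ _ _ h, Nat.sub_self]
        have hy : ([y] : List Int).getD 0 0 = y := rfl
        rw [hy, firstP_concat]
        have := firstP_lt l y
        split <;> omega

lemma firstP_concat_mem (l : List Int) (y x : Int) (h : x ∈ l) :
    firstP (l ++ [y]) x = firstP l x := by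
  rw [firstP_concat, if_neg (fun hc => (firstP_neg_iff l x).mp hc.1 h)]

lemma G_lt (l : List Int) (j : Nat) : G l j < (l.length : Int) := lastP_lt _ _

lemma G_ge (l : List Int) (j : Nat) (h : j < l.length) : (j : Int) ≤ G l j := lastP_getD_ge _ _ h

lemma buildLast_concat (l : List Int) (y : Int) :
    buildLast (l ++ [y]) =
      (buildLast l).insert y (max ((buildLast l).getD y (l.length : Int)) (l.length : Int)) := by
  simp [buildLast, enum_concat, List.foldl_append]

lemma buildLast_getD (l : List Int) :
    ∀ x d0, (buildLast l).getD x d0 = if x ∈ l then lastP l x else d0 := by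
  induction l using List.reverseRecOn with
  | nil => intro x d0; simp [buildLast, PySem.List.enumerate_nil, PySem.Dict.getD_empty]
  | append_singleton l y ih =>
      intro x d0
      rw [buildLast_concat, PySem.Dict.getD_insert, lastP_concat]
      have hv : max ((buildLast l).getD y (l.length : Int)) (l.length : Int) = (l.length : Int) := by
        rw [ih y (l.length : Int)]
        split
        · have := lastP_lt l y; omega
        · omega
      rw [hv]
      by_cases hxy : x = y
      · subst hxy
        simp [List.mem_append]
      · rw [if_neg hxy, ih x d0]
        have hyx : ¬ y = x := fun hc => hxy hc.symm
        simp [List.mem_append, hxy, hyx]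

lemma getD_buildLast_G (l : List Int) (j : Nat) (h : j < l.length) :
    (buildLast l).getD (l.getD j 0) 0 = G l j := by
  rw [buildLast_getD, if_pos (by rw [List.getD_eq_getElem l 0 h]; exact List.getElem_mem h)]
  rfl

lemma dedup_concat (l : List Int) (y : Int) :
    PySem.List.dedup (l ++ [y]) =
      if y ∈ l then PySem.List.dedup l else PySem.List.dedup l ++ [y] := by
  rw [PySem.List.dedup_eq_ofList, PySem.List.dedup_eq_ofList, PySem.Set.ofList_eq_foldl,
    PySem.Set.ofList_eq_foldl, List.foldl_append]
  simp only [List.foldl_cons, List.foldl_nil]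
  rw [← PySem.Set.ofList_eq_foldl]
  simp only [PySem.Set.add, PySem.Set.contains]
  by_cases h : y ∈ l
  · have : y ∈ PySem.Set.ofList l := (PySem.Set.mem_ofList _ _).mpr h
    simp [h, this]
  · have : y ∉ PySem.Set.ofList l := fun hc => h ((PySem.Set.mem_ofList _ _).mp hc)
    simp [h, this]

lemma pairwise_firstP (l : List Int) :
    (PySem.List.dedup l).Pairwise (fun a b => firstP l a < firstP l b) := by
  induction l using List.reverseRecOn with
  | nil => simp [PySem.List.dedup_eq_ofList, PySem.Set.ofList_eq_foldl]
  | append_singleton l y ih =>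
      rw [dedup_concat]
      by_cases h : y ∈ l
      · rw [if_pos h]
        refine ih.imp_of_mem ?_
        intro a b ha hb hab
        rw [firstP_concat_mem l y a ((PySem.List.mem_dedup _ _).mp ha),
          firstP_concat_mem l y b ((PySem.List.mem_dedup _ _).mp hb)]
        exact hab
      · rw [if_neg h]
        rw [List.pairwise_append]
        refine ⟨ih.imp_of_mem ?_, List.pairwise_singleton _ _, ?_⟩
        · intro a b ha hb hab
          rw [firstP_concat_mem l y a ((PySem.List.mem_dedup _ _).mp ha),
            firstP_concat_mem l y b ((PySem.List.mem_dedup _ _).mp hb)]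
          exact hab
        · intro a ha b hb
          rw [List.mem_singleton] at hb
          subst hb
          rw [firstP_concat_mem l b a ((PySem.List.mem_dedup _ _).mp ha),
            firstP_concat, if_pos ⟨(firstP_neg_iff l b).mpr h, rfl⟩]
          have := firstP_lt l a
          omega

lemma buildIv_concat (l : List Int) (y : Int) :
    buildIv (l ++ [y]) =
      (if (buildIv l).contains y then
        (buildIv l).insert y (((buildIv l).getD y (0, 0)).1, (l.length : Int))
      else (buildIv l).insert y ((l.length : Int), (l.length : Int))) := by
  simp [buildIv, enum_concat, List.foldl_append]

lemma buildIv_items (l : List Int) :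
    (buildIv l).items = (PySem.List.dedup l).map (fun x => (x, (firstP l x, lastP l x))) := by
  induction l using List.reverseRecOn with
  | nil => rfl
  | append_singleton l y ih =>
      have hkeys : (buildIv l).keys = PySem.List.dedup l := by
        simp only [PySem.Dict.keys, ih, List.map_map]
        exact List.map_congr_left (fun x _ => rfl) |>.trans (List.map_id _)
      have hnodup : (buildIv l).keys.Nodup := by
        rw [hkeys]; exact PySem.List.nodup_dedup l
      have hcont : (buildIv l).contains y = decide (y ∈ l) := by
        rw [PySem.Dict.contains_eq_decide_mem_keys, hkeys]
        simp
      rw [buildIv_concat]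
      by_cases h : y ∈ l
      · have hct : (buildIv l).contains y = true := by simp [hcont, h]
        rw [if_pos hct]
        have hmemit : (y, (firstP l y, lastP l y)) ∈ (buildIv l).items := by
          rw [ih]
          exact List.mem_map_of_mem ((PySem.List.mem_dedup _ _).mpr h)
        have hget : (buildIv l).getD y (0, 0) = (firstP l y, lastP l y) :=
          PySem.Dict.getD_of_mem_items _ hmemit hnodup _
        rw [PySem.Dict.items_insert_of_contains _ _ hct, hget, ih,
          dedup_concat, if_pos h, List.map_map]
        apply List.map_congr_left
        intro x hx
        have hxl : x ∈ l := (PySem.List.mem_dedup _ _).mp hx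
        by_cases hxy : x = y
        · subst hxy
          simp only [Function.comp_apply, beq_self_eq_true, if_pos]
          rw [firstP_concat_mem l x x hxl, lastP_concat, if_pos rfl]
        · have : (x == y) = false := by simp [hxy]
          simp only [Function.comp_apply, this, Bool.false_eq_true, if_false]
          rw [firstP_concat_mem l y x hxl, lastP_concat,
            if_neg (fun hc => hxy hc.symm)]
      · have hcf : (buildIv l).contains y = false := by simp [hcont, h]
        rw [if_neg (by simp [hcf]), PySem.Dict.items_insert_of_not_contains _ _ hcf,
          ih, dedup_concat, if_neg h, List.map_append]
        congr 1
        · apply List.map_congr_left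
          intro x hx
          have hxl : x ∈ l := (PySem.List.mem_dedup _ _).mp hx
          have hyx : ¬ y = x := fun hc => h (by rw [hc]; exact hxl)
          rw [firstP_concat_mem l y x hxl, lastP_concat, if_neg hyx]
        · simp only [List.map_cons, List.map_nil]
          rw [firstP_concat, if_pos ⟨(firstP_neg_iff l y).mpr h, rfl⟩,
            lastP_concat, if_pos rfl]

lemma buildIv_values (l : List Int) : (buildIv l).values = firstsList l := by
  simp only [PySem.Dict.values, buildIv_items, List.map_map, firstsList]
  rfl

lemma head_eq (l : List Int) (i : Nat) (L : List (Int × Int))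
    (hmem : Hmem l i L) (hcomp : Hcomp l i L)
    (hsort : L.Pairwise (fun p q => p.1 < q.1))
    (hfo : firstP l (l.getD i 0) = (i : Int)) (hin : i < l.length) :
    ∃ L', L = ((i : Int), G l i) :: L' ∧ Hmem l (i + 1) L' ∧ Hcomp l (i + 1) L' ∧
      L'.Pairwise (fun p q => p.1 < q.1) := by
  have hiL : ((i : Int), G l i) ∈ L := hcomp i (le_refl i) hin hfo
  match L, hsort with
  | [], _ => simp at hiL
  | p :: L', hsort =>
    have hp : p = ((i : Int), G l i) := by
      rcases List.mem_cons.mp hiL with h | h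
      · exact h.symm
      · exfalso
        have hlt : p.1 < (i : Int) := (List.rel_of_pairwise_cons hsort h)
        obtain ⟨j, hj1, hj2, _⟩ := hmem p (List.mem_cons_self)
        omega
    subst hp
    refine ⟨L', rfl, ?_, ?_, hsort.of_cons⟩
    · intro q hq
      obtain ⟨j, hj1, hj2, hj3, hj4, hj5⟩ := hmem q (List.mem_cons_of_mem _ hq)
      have : ((i : Int), G l i).1 < q.1 := List.rel_of_pairwise_cons hsort hq
      exact ⟨j, hj1, by simp at this; omega, hj3, hj4, hj5⟩
    · intro j hj1 hj2 hj3
      rcases List.mem_cons.mp (hcomp j (by omega) hj2 hj3) with h | h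
      · exfalso
        have : (j : Int) = (i : Int) := congrArg Prod.fst h
        omega
      · exact h

lemma shift_not_first (l : List Int) (i : Nat) (L : List (Int × Int))
    (hmem : Hmem l i L) (hcomp : Hcomp l i L)
    (hnf : firstP l (l.getD i 0) ≠ (i : Int)) :
    Hmem l (i + 1) L ∧ Hcomp l (i + 1) L := by
  constructor
  · intro p hp
    obtain ⟨j, hj1, hj2, hj3, hj4, hj5⟩ := hmem p hp
    have hji : j ≠ i := by
      intro hc; subst hc; exact hnf hj4
    exact ⟨j, hj1, by omega, hj3, hj4, hj5⟩
  · intro j hj1 hj2 hj3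
    exact hcomp j (by omega) hj2 hj3

lemma G_eq_of_not_first (l : List Int) (i s : Nat) (e : Int) (hin : i < l.length)
    (hnf : firstP l (l.getD i 0) ≠ (i : Int)) (hsi : s < i)
    (hclosed : ∀ m : Nat, m < s → G l m < (s : Int))
    (hemax : ∀ m : Nat, s ≤ m → m < i → G l m ≤ e) :
    G l i ≤ e := by
  have hmem : l.getD i 0 ∈ l := by
    rw [List.getD_eq_getElem l 0 hin]; exact List.getElem_mem hin
  obtain ⟨ha, hb, hc⟩ := firstP_spec l _ hmem
  have hle : firstP l (l.getD i 0) ≤ (i : Int) := firstP_getD_le l i hin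
  set f0 : Nat := (firstP l (l.getD i 0)).toNat with hf0
  have hf0i : (f0 : Int) = firstP l (l.getD i 0) := Int.toNat_of_nonneg ha
  have hf0lt : f0 < i := by omega
  have hGeq : G l f0 = G l i := by
    unfold G
    rw [hf0, hc]
  have hGi : (i : Int) ≤ G l i := G_ge l i hin
  rcases Nat.lt_or_ge f0 s with h | h
  · have := hclosed f0 h
    omega
  · have := hemax f0 h hf0lt
    omega

lemma merge_agree (l : List Int) :
    ∀ (k : Nat) (i s fI fO : Nat) (e c : Int) (L : List (Int × Int)),
    l.length - i ≤ k →
    l.length + 1 ≤ fI + i → l.length + 1 ≤ fO + i →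
    s < i → i ≤ l.length →
    c = (i : Int) - (s : Int) →
    e < (l.length : Int) →
    (∀ m : Nat, s ≤ m → m < i → G l m ≤ e) →
    (∀ m : Nat, m < s → G l m < (s : Int)) →
    Hmem l i L → Hcomp l i L →
    L.Pairwise (fun p q => p.1 < q.1) →
    (innerA (buildLast l) l fI i e c).1 ::
        outerA (buildLast l) l fO (innerA (buildLast l) l fI i e c).2
      = mergeB (s : Int) e L := by
  intro k
  induction k with
  | zero =>
      intro i s fI fO e c L hk hfI hfO hsi hin hc hen hemax hclosed hmem hcomp hsort
      have hiN : i = l.length := by omega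
      have hie : ¬ ((i : Int) ≤ e) := by omega
      obtain ⟨fI', rfl⟩ : ∃ t, fI = t + 1 := ⟨fI - 1, by omega⟩
      rw [show innerA (buildLast l) l (fI' + 1) i e c = (c, i) from by
        simp [innerA, hie]]
      have hLnil : L = [] := by
        cases L with
        | nil => rfl
        | cons p t =>
            obtain ⟨j, _, hj2, hj3, _⟩ := hmem p List.mem_cons_self
            omega
      subst hLnil
      obtain ⟨fO', rfl⟩ : ∃ t, fO = t + 1 := ⟨fO - 1, by omega⟩
      have hout : outerA (buildLast l) l (fO' + 1) i = [] := by
        simp [outerA, hiN]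
      rw [hout]
      have hei : e = (i : Int) - 1 := by
        have h1 : i - 1 < l.length := by omega
        have h2 := hemax (i - 1) (by omega) (by omega)
        have h3 := G_ge l (i - 1) h1
        omega
      show ([c] : List Int) = [e - (s : Int) + 1]
      congr 1
      omega
  | succ k ih =>
      intro i s fI fO e c L hk hfI hfO hsi hin hc hen hemax hclosed hmem hcomp hsort
      obtain ⟨fI', rfl⟩ : ∃ t, fI = t + 1 := ⟨fI - 1, by omega⟩
      by_cases hie : (i : Int) ≤ e
      · -- extend the running segment past position i
        have hiln : i < l.length := by omega
        rw [show innerA (buildLast l) l (fI' + 1) i e c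
            = innerA (buildLast l) l fI' (i + 1) (max ((buildLast l).getD (l.getD i 0) 0) e) (c + 1)
          from by simp [innerA, hie]]
        rw [getD_buildLast_G l i hiln]
        by_cases hfo : firstP l (l.getD i 0) = (i : Int)
        · obtain ⟨L', rfl, hmem', hcomp', hsort'⟩ := head_eq l i L hmem hcomp hsort hfo hiln
          rw [show mergeB (s : Int) e (((i : Int), G l i) :: L')
              = mergeB (s : Int) (max (G l i) e) L' from by
            simp [mergeB, hie, max_comm]]
          exact ih (i + 1) s fI' fO (max (G l i) e) (c + 1) L' (by omega) (by omega) (by omega)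
            (by omega) (by omega) (by push_cast; omega) (max_lt (G_lt l i) hen)
            (by
              intro m h1 h2
              rcases Nat.lt_or_ge m i with h | h
              · exact le_trans (hemax m h1 h) (le_max_right _ _)
              · have : m = i := by omega
                subst this
                exact le_max_left _ _)
            hclosed hmem' hcomp' hsort'
        · have hGle : G l i ≤ e := G_eq_of_not_first l i s e hiln hfo hsi hclosed hemax
          rw [max_eq_right hGle]
          obtain ⟨hmem', hcomp'⟩ := shift_not_first l i L hmem hcomp hfo
          exact ih (i + 1) s fI' fO e (c + 1) L (by omega) (by omega) (by omega)
            (by omega) (by omega) (by push_cast; omega) hen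
            (by
              intro m h1 h2
              rcases Nat.lt_or_ge m i with h | h
              · exact hemax m h1 h
              · have : m = i := by omega
                subst this
                exact hGle)
            hclosed hmem' hcomp' hsort
      · -- segment closes at i - 1
        rw [show innerA (buildLast l) l (fI' + 1) i e c = (c, i) from by
          simp [innerA, hie]]
        have hei : e = (i : Int) - 1 := by
          have h1 : i - 1 < l.length := by omega
          have h2 := hemax (i - 1) (by omega) (by omega)
          have h3 := G_ge l (i - 1) h1
          omega
        rcases Nat.lt_or_ge i l.length with hlt | hge
        · -- a new segment starts at i
          have hfo : firstP l (l.getD i 0) = (i : Int) := by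
            by_contra hnf
            have h1 := G_eq_of_not_first l i s e hlt hnf hsi hclosed hemax
            have h2 := G_ge l i hlt
            omega
          obtain ⟨L', rfl, hmem', hcomp', hsort'⟩ := head_eq l i L hmem hcomp hsort hfo hlt
          rw [show mergeB (s : Int) e (((i : Int), G l i) :: L')
              = (e - (s : Int) + 1) :: mergeB (i : Int) (G l i) L' from by
            simp [mergeB, hie]]
          obtain ⟨fO', rfl⟩ : ∃ t, fO = t + 1 := ⟨fO - 1, by omega⟩
          have hout : outerA (buildLast l) l (fO' + 1) i
              = (innerA (buildLast l) l (l.length + 1) (i + 1) (G l i) 1).1 ::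
                outerA (buildLast l) l fO'
                  (innerA (buildLast l) l (l.length + 1) (i + 1) (G l i) 1).2 := by
            have hG := getD_buildLast_G l i hlt
            simp only [outerA, if_pos hlt, hG]
          rw [hout]
          have hrec := ih (i + 1) i (l.length + 1) fO' (G l i) 1 L' (by omega) (by omega)
            (by omega) (by omega) (by omega) (by push_cast; omega) (G_lt l i)
            (by
              intro m h1 h2
              have : m = i := by omega
              subst this
              exact le_refl _)
            (by
              intro m hm
              rcases Nat.lt_or_ge m s with h | h
              · have := hclosed m h; omega
              · have := hemax m h hm; omega)
            hmem' hcomp' hsort'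
          rw [hrec]
          congr 1
          omega
        · -- end of input: last segment
          have hiN : i = l.length := by omega
          have hLnil : L = [] := by
            cases L with
            | nil => rfl
            | cons p t =>
                obtain ⟨j, _, hj2, hj3, _⟩ := hmem p List.mem_cons_self
                omega
          subst hLnil
          obtain ⟨fO', rfl⟩ : ∃ t, fO = t + 1 := ⟨fO - 1, by omega⟩
          have hout : outerA (buildLast l) l (fO' + 1) i = [] := by
            simp [outerA, hiN]
          rw [hout]
          show ([c] : List Int) = [e - (s : Int) + 1]
          congr 1
          omega

lemma outer_phase (l : List Int) (fO i : Nat) (L : List (Int × Int))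
    (hfO : l.length + 1 ≤ fO + i) (hin : i ≤ l.length)
    (hclosed : ∀ m : Nat, m < i → G l m < (i : Int))
    (hmem : Hmem l i L) (hcomp : Hcomp l i L)
    (hsort : L.Pairwise (fun p q => p.1 < q.1)) :
    outerA (buildLast l) l fO i = (match L with | [] => [] | (f, g) :: t => mergeB f g t) := by
  rcases Nat.lt_or_ge i l.length with hlt | hge
  · have hfo : firstP l (l.getD i 0) = (i : Int) := by
      have hmeml : l.getD i 0 ∈ l := by
        rw [List.getD_eq_getElem l 0 hlt]; exact List.getElem_mem hlt
      obtain ⟨ha, _, hc⟩ := firstP_spec l _ hmeml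
      have hle : firstP l (l.getD i 0) ≤ (i : Int) := firstP_getD_le l i hlt
      by_contra hnf
      set f0 : Nat := (firstP l (l.getD i 0)).toNat with hf0
      have hf0i : (f0 : Int) = firstP l (l.getD i 0) := Int.toNat_of_nonneg ha
      have hf0lt : f0 < i := by omega
      have hGeq : G l f0 = G l i := by
        unfold G
        rw [hf0, hc]
      have h1 := hclosed f0 hf0lt
      have h2 := G_ge l i hlt
      omega
    obtain ⟨L', rfl, hmem', hcomp', hsort'⟩ := head_eq l i L hmem hcomp hsort hfo hlt
    obtain ⟨fO', rfl⟩ : ∃ t, fO = t + 1 := ⟨fO - 1, by omega⟩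
    have hout : outerA (buildLast l) l (fO' + 1) i
        = (innerA (buildLast l) l (l.length + 1) (i + 1) (G l i) 1).1 ::
          outerA (buildLast l) l fO'
            (innerA (buildLast l) l (l.length + 1) (i + 1) (G l i) 1).2 := by
      have hG := getD_buildLast_G l i hlt
      simp only [outerA, if_pos hlt, hG]
    rw [hout]
    exact merge_agree l (l.length) (i + 1) i (l.length + 1) fO' (G l i) 1 L' (by omega)
      (by omega) (by omega) (by omega) (by omega) (by push_cast; omega) (G_lt l i)
      (by
        intro m h1 h2
        have : m = i := by omega
        subst this
        exact le_refl _)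
      (by intro m hm; exact hclosed m hm)
      hmem' hcomp' hsort'
  · have hiN : i = l.length := by omega
    have hLnil : L = [] := by
      cases L with
      | nil => rfl
      | cons p t =>
          obtain ⟨j, _, hj2, hj3, _⟩ := hmem p List.mem_cons_self
          omega
    subst hLnil
    obtain ⟨fO', rfl⟩ : ∃ t, fO = t + 1 := ⟨fO - 1, by omega⟩
    simp [outerA, hiN]

lemma firstsList_hyps (l : List Int) :
    Hmem l 0 (firstsList l) ∧ Hcomp l 0 (firstsList l) ∧
      (firstsList l).Pairwise (fun p q => p.1 < q.1) := by
  refine ⟨?_, ?_, ?_⟩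
  · intro p hp
    obtain ⟨x, hx, rfl⟩ := List.mem_map.mp hp
    have hxl : x ∈ l := (PySem.List.mem_dedup _ _).mp hx
    obtain ⟨ha, hb, hc⟩ := firstP_spec l x hxl
    refine ⟨(firstP l x).toNat, by simp; omega, by omega, by omega, ?_, ?_⟩
    · rw [hc]
      simp
      omega
    · unfold G
      rw [hc]
  · intro j hj1 hj2 hj3
    have hmeml : l.getD j 0 ∈ l := by
      rw [List.getD_eq_getElem l 0 hj2]; exact List.getElem_mem hj2
    have hdd : l.getD j 0 ∈ PySem.List.dedup l := (PySem.List.mem_dedup _ _).mpr hmeml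
    have h := List.mem_map_of_mem (f := fun x => (firstP l x, lastP l x)) hdd
    simp only at h
    rw [hj3] at h
    exact h
  · exact List.pairwise_map.mpr ((pairwise_firstP l).imp (fun h => h))

-- ===== VERDICT (by name: the statement is the Claim_ definition above) =====
theorem lengthEachScene_spec : Claim_equal_lengthEachScene := by
  intro l _
  unfold Spec_lengthEachScene lengthEachScene lengthEachScene_alt
  obtain ⟨h1, h2, h3⟩ := firstsList_hyps l
  rw [buildIv_values, outer_phase l (l.length + 1) 0 (firstsList l) (by omega) (by omega)
    (by intro m hm; omega) h1 h2 h3]
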